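-- pv_equiv track=rewrite | github.com/pholoto/deeplearningproject | models/baseline_utils.py | build_token_statistics
-- ===== SOURCE A (Python) =====
-- from collections import Counter, defaultdict
-- from typing import Dict, Iterable, List, Tuple
--
-- TextPair = Tuple[str, str]
--
-- START_TOKEN = "[start]"
--
-- END_TOKEN = "[end]"
--
-- def strip_special_tokens(text: str) -> str:
--     text = text.strip()
--     if text.startswith(f"{START_TOKEN} "):
--         text = text[len(START_TOKEN) + 1 :]
--     if text.endswith(f" {END_TOKEN}"):
--         text = text[: -(len(END_TOKEN) + 1)]
--     return text
--
-- def build_token_statistics(train_pairs: Iterable[TextPair]) -> Tuple[Dict[str, List[str]], Dict[str, Counter[str]]]: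
--     variants: Dict[str, List[str]] = defaultdict(list)
--     counts: Dict[str, Counter[str]] = defaultdict(Counter)
--     for stripped, label in train_pairs:
--         label_body = strip_special_tokens(label)
--         stripped_tokens = stripped.split()
--         label_tokens = label_body.split()
--         if len(stripped_tokens) != len(label_tokens):
--             continue
--         for src_tok, lbl_tok in zip(stripped_tokens, label_tokens):
--             key = src_tok.lower()
--             variants[key].append(lbl_tok)
--             counts[key][lbl_tok] += 1
--     return variants, counts
-- ===== SOURCE B (Python) =====
-- from collections import Counter, defaultdict
--
-- START_TOKEN = "[start]"
-- END_TOKEN = "[end]"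
--
--
-- def strip_special_tokens(text):
--     text = text.strip()
--     if text.startswith(f"{START_TOKEN} "):
--         text = text[len(START_TOKEN) + 1 :]
--     if text.endswith(f" {END_TOKEN}"):
--         text = text[: -(len(END_TOKEN) + 1)]
--     return text
--
--
-- def build_token_statistics(train_pairs):
--     # Pass 1: flatten to (lowercased source token, label token) pairs.
--     flat = []
--     for stripped, label in train_pairs:
--         src = stripped.split()
--         lbl = strip_special_tokens(label).split()
--         if len(src) == len(lbl):
--             flat.extend((s.lower(), t) for s, t in zip(src, lbl))
--     # Pass 2: group label tokens by key.
--     variants = defaultdict(list)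
--     for key, tok in flat:
--         variants[key].append(tok)
--     # Pass 3: derive the frequency Counters from the grouped lists.
--     counts = defaultdict(Counter)
--     for key, toks in variants.items():
--         counts[key] = Counter(toks)
--     return variants, counts
-- ===== Notes on version B (the rewrite author's own statement) =====
-- stated objective: simpler
-- what changed: A maintains two dicts (variants and nested Counters) inside the token loop; B flattens all pairs to a (key, label-token) list in one pass, groups them into variants in a second pass, and derives each Counter from the grouped list afterwards, so no nested dict is updated during traversal.
import Mathlib
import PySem

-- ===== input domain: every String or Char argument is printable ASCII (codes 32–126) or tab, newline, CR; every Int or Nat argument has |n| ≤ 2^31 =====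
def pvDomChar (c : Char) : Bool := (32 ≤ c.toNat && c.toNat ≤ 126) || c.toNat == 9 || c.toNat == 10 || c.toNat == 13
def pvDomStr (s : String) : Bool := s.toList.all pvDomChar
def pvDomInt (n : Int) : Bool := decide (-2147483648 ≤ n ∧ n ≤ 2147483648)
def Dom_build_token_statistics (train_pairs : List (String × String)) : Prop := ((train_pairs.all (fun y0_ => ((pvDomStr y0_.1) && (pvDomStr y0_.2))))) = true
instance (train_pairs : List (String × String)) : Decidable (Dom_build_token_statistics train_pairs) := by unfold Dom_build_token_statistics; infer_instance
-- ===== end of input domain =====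

-- B keeps the single scan but only flattens (key, label-token) pairs during it, then groups and
-- finally derives the per-key Counters from the grouped lists; simpler staging, same results.

-- shared helper: the module's strip_special_tokens (identical in Source A and Source B)
def stripSpecialTokens (text : String) : String :=
  let t := PySem.Str.strip text
  let t := if PySem.Str.startswith t "[start] " then PySem.Str.slice t (some 8) none else t
  let t := if PySem.Str.endswith t " [end]" then PySem.Str.slice t none (some (-6)) else t
  t

-- ===== PORT A =====
-- one loop maintaining (variants, counts) together; inner loop updates both dicts per token
def build_token_statistics (train_pairs : List (String × String)) : (List (String × List String)) × (List (String × List (String × Int))) :=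
  let st := train_pairs.foldl
    (fun (st : PySem.Dict String (List String) × PySem.Dict String (PySem.Dict String Int)) p =>
      let label_body := stripSpecialTokens p.2
      let stripped_tokens := PySem.Str.split₀ p.1
      let label_tokens := PySem.Str.split₀ label_body
      if stripped_tokens.length ≠ label_tokens.length then st
      else (stripped_tokens.zip label_tokens).foldl
        (fun st q =>
          let key := PySem.Str.lower q.1
          (st.1.modify key [] (· ++ [q.2]),
           st.2.modify key PySem.Dict.empty (fun c => c.modify q.2 0 (· + 1))))
        st)
    (PySem.Dict.empty, PySem.Dict.empty)
  (st.1.items, st.2.items.map (fun kv => (kv.1, kv.2.items)))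

-- ===== PORT B =====
-- pass 1: flatten to (lowercased key, label token) pairs
def pvFlat (train_pairs : List (String × String)) : List (String × String) :=
  train_pairs.foldl
    (fun acc p =>
      let src := PySem.Str.split₀ p.1
      let lbl := PySem.Str.split₀ (stripSpecialTokens p.2)
      if src.length = lbl.length then
        acc ++ (src.zip lbl).map (fun q => (PySem.Str.lower q.1, q.2))
      else acc)
    []

def build_token_statistics_alt (train_pairs : List (String × String)) : (List (String × List String)) × (List (String × List (String × Int))) :=
  let flat := pvFlat train_pairs
  -- pass 2: group label tokens by key
  let variants := flat.foldl (fun d q => d.modify q.1 [] (· ++ [q.2])) PySem.Dict.empty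
  -- pass 3: a Counter per grouped list
  (variants.items, variants.items.map (fun kv => (kv.1, (PySem.Dict.counter kv.2).items)))

-- ===== PRECONDITION & SPEC =====
def Spec_build_token_statistics (train_pairs : List (String × String)) (out : (List (String × List String)) × (List (String × List (String × Int)))) : Prop := out = build_token_statistics_alt train_pairs
instance (train_pairs : List (String × String)) (out : (List (String × List String)) × (List (String × List (String × Int)))) : Decidable (Spec_build_token_statistics train_pairs out) := by unfold Spec_build_token_statistics; infer_instance

-- ===== CLAIM (what is proved, stated in full; the proofs are below) =====
def Claim_equal_build_token_statistics : Prop := ∀ (train_pairs : List (String × String)), Dom_build_token_statistics train_pairs → Spec_build_token_statistics train_pairs (build_token_statistics train_pairs)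

-- ===== LEMMAS AND PROOFS =====

-- proof-only: the flattened pair list as a flatMap
def pvFlatBody (tp : List (String × String)) : List (String × String) :=
  tp.flatMap (fun p =>
    if (PySem.Str.split₀ p.1).length = (PySem.Str.split₀ (stripSpecialTokens p.2)).length then
      ((PySem.Str.split₀ p.1).zip (PySem.Str.split₀ (stripSpecialTokens p.2))).map
        (fun q => (PySem.Str.lower q.1, q.2))
    else [])

-- proof-only names for the two grouping steps
def pvVStep (d : PySem.Dict String (List String)) (q : String × String) : PySem.Dict String (List String) :=
  d.modify q.1 [] (· ++ [q.2])

def pvCStep (c : PySem.Dict String (PySem.Dict String Int)) (q : String × String) :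
    PySem.Dict String (PySem.Dict String Int) :=
  c.modify q.1 PySem.Dict.empty (fun cc => cc.modify q.2 0 (· + 1))

def pvCnt (kv : String × List String) : String × PySem.Dict String Int :=
  (kv.1, PySem.Dict.counter kv.2)

lemma pvFlatBody_cons (p : String × String) (tp : List (String × String)) :
    pvFlatBody (p :: tp) =
      (if (PySem.Str.split₀ p.1).length = (PySem.Str.split₀ (stripSpecialTokens p.2)).length then
        ((PySem.Str.split₀ p.1).zip (PySem.Str.split₀ (stripSpecialTokens p.2))).map
          (fun q => (PySem.Str.lower q.1, q.2))
      else []) ++ pvFlatBody tp := by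
  simp [pvFlatBody]

-- inserting (k, counter w) into the counter-image of v is the image of inserting (k, w)
lemma insert_counter_image (v : PySem.Dict String (List String)) (k : String) (w : List String) :
    (PySem.Dict.mk (v.items.map pvCnt)).insert k (PySem.Dict.counter w)
      = PySem.Dict.mk ((v.insert k w).items.map pvCnt) := by
  have hco : (PySem.Dict.mk (v.items.map pvCnt)).contains k = v.contains k := by
    simp [PySem.Dict.contains, List.any_map, Function.comp_def, pvCnt]
  by_cases h : v.contains k = true
  · simp only [PySem.Dict.insert, hco, h, if_pos]
    congr 1
    rw [List.map_map, List.map_map]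
    apply List.map_congr_left
    intro p _
    by_cases hp : (p.1 == k) = true <;> simp [pvCnt, Function.comp, hp]
  · simp [PySem.Dict.insert, hco, h, pvCnt]

-- get? through the counter image
lemma get?_counter_image (v : PySem.Dict String (List String)) (k : String) :
    (PySem.Dict.mk (v.items.map pvCnt)).get? k = (v.get? k).map PySem.Dict.counter := by
  simp only [PySem.Dict.get?, List.find?_map]
  have : (fun (p : String × PySem.Dict String Int) => p.1 == k) ∘ pvCnt
       = (fun (p : String × List String) => p.1 == k) := by
    funext p; simp [pvCnt]
  rw [this]
  cases List.find? (fun (p : String × List String) => p.1 == k) v.items <;> simp [pvCnt]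

-- one update step preserves the image relation
lemma step_counter_image (v : PySem.Dict String (List String)) (k t : String) :
    pvCStep (PySem.Dict.mk (v.items.map pvCnt)) (k, t)
      = PySem.Dict.mk ((pvVStep v (k, t)).items.map pvCnt) := by
  have hget : (PySem.Dict.mk (v.items.map pvCnt)).getD k PySem.Dict.empty
      = PySem.Dict.counter (v.getD k []) := by
    simp only [PySem.Dict.getD, get?_counter_image]
    cases v.get? k <;> simp [PySem.Dict.counter, PySem.Dict.empty]
  have h1 : pvCStep (PySem.Dict.mk (v.items.map pvCnt)) (k, t)
      = (PySem.Dict.mk (v.items.map pvCnt)).insert k (PySem.Dict.counter (v.getD k [] ++ [t])) := by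
    rw [PySem.Dict.counter_append_singleton]
    simp only [pvCStep, PySem.Dict.modify, hget]
  rw [h1]
  exact insert_counter_image v k (v.getD k [] ++ [t])

-- A's counts dict stays the counter-image of A's variants dict through any pair list
lemma foldl_counts_image (L : List (String × String)) (v : PySem.Dict String (List String)) :
    L.foldl pvCStep (PySem.Dict.mk (v.items.map pvCnt))
      = PySem.Dict.mk ((L.foldl pvVStep v).items.map pvCnt) := by
  induction L generalizing v with
  | nil => rfl
  | cons q L ih =>
      rw [List.foldl_cons, List.foldl_cons, step_counter_image v q.1 q.2]
      exact ih (pvVStep v (q.1, q.2))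

-- the zipped inner loop over a pair state is the two grouping folds over the key-lowered pairs
lemma inner_flat (zl : List (String × String)) (v : PySem.Dict String (List String))
    (c : PySem.Dict String (PySem.Dict String Int)) :
    zl.foldl
      (fun st q =>
        (st.1.modify (PySem.Str.lower q.1) [] (· ++ [q.2]),
         st.2.modify (PySem.Str.lower q.1) PySem.Dict.empty (fun cc => cc.modify q.2 0 (· + 1))))
      (v, c)
    = ((zl.map (fun q => (PySem.Str.lower q.1, q.2))).foldl pvVStep v,
       (zl.map (fun q => (PySem.Str.lower q.1, q.2))).foldl pvCStep c) := by
  induction zl generalizing v c with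
  | nil => rfl
  | cons q zl ih => simp only [List.foldl_cons, List.map_cons, ih, pvVStep, pvCStep]

-- A's outer fold over pairs equals componentwise folds over the flattened pair list
lemma foldl_pair_flat (tp : List (String × String))
    (v : PySem.Dict String (List String)) (c : PySem.Dict String (PySem.Dict String Int)) :
    tp.foldl
      (fun st p =>
        if (PySem.Str.split₀ p.1).length ≠ (PySem.Str.split₀ (stripSpecialTokens p.2)).length then st
        else ((PySem.Str.split₀ p.1).zip (PySem.Str.split₀ (stripSpecialTokens p.2))).foldl
          (fun st q =>
            (st.1.modify (PySem.Str.lower q.1) [] (· ++ [q.2]),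
             st.2.modify (PySem.Str.lower q.1) PySem.Dict.empty (fun cc => cc.modify q.2 0 (· + 1))))
          st)
      (v, c)
    = ((pvFlatBody tp).foldl pvVStep v, (pvFlatBody tp).foldl pvCStep c) := by
  induction tp generalizing v c with
  | nil => rfl
  | cons p tp ih =>
      rw [List.foldl_cons, pvFlatBody_cons, List.foldl_append, List.foldl_append]
      by_cases h : (PySem.Str.split₀ p.1).length = (PySem.Str.split₀ (stripSpecialTokens p.2)).length
      · rw [if_neg (not_ne_iff.mpr h), if_pos h, inner_flat]
        exact ih _ _
      · rw [if_pos h, if_neg h]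
        exact ih v c

-- pvFlat is the flatMap form pvFlatBody
lemma pvFlat_eq (tp : List (String × String)) : pvFlat tp = pvFlatBody tp := by
  unfold pvFlat pvFlatBody
  have : (fun (acc : List (String × String)) (p : String × String) =>
        let src := PySem.Str.split₀ p.1
        let lbl := PySem.Str.split₀ (stripSpecialTokens p.2)
        if src.length = lbl.length then
          acc ++ (src.zip lbl).map (fun q => (PySem.Str.lower q.1, q.2))
        else acc)
      = (fun acc p => acc ++
          (if (PySem.Str.split₀ p.1).length = (PySem.Str.split₀ (stripSpecialTokens p.2)).length then
            ((PySem.Str.split₀ p.1).zip (PySem.Str.split₀ (stripSpecialTokens p.2))).map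
              (fun q => (PySem.Str.lower q.1, q.2))
          else [])) := by
    funext acc p
    by_cases h : (PySem.Str.split₀ p.1).length = (PySem.Str.split₀ (stripSpecialTokens p.2)).length <;>
      simp [h]
  rw [this, PySem.List.foldl_append_eq_flatMap]
  simp

-- ===== VERDICT (by name: the statement is the Claim_ definition above) =====
theorem build_token_statistics_spec : Claim_equal_build_token_statistics := by
  intro tp _
  unfold Spec_build_token_statistics build_token_statistics build_token_statistics_alt
  rw [pvFlat_eq]
  have hA := foldl_pair_flat tp PySem.Dict.empty PySem.Dict.empty
  simp only [] at hA ⊢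
  rw [hA]
  have hC : (PySem.Dict.empty : PySem.Dict String (PySem.Dict String Int))
      = PySem.Dict.mk ((PySem.Dict.empty : PySem.Dict String (List String)).items.map pvCnt) := rfl
  rw [hC, foldl_counts_image]
  unfold pvVStep
  simp [pvCnt, List.map_map, Function.comp]
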